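-- pv_equiv track=rewrite | github.com/samuelemarro/convergent-sequent-calculator | utils.py | get_pairings
-- ===== SOURCE A (Python) =====
-- def get_pairings(a, b):
--     if len(b) == 0:
--         return [[]]
--
--     if isinstance(a, set):
--         a = list(a)
--     if isinstance(b, set):
--         b = list(b)
--     if len(a) == 0:
--         return [[]]
--
--     first_a = a[0]
--
--     new_pairings = []
--
--     successive_pairings = get_pairings(a[1:], b)
--
--     for successive_pairing in successive_pairings:
--         for bi in b:
--             new_pairing = list(successive_pairing)
--             new_pairing.append((first_a, bi))
--
--             new_pairings.append(new_pairing)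
--
--     return new_pairings
-- ===== SOURCE B (Python) =====
-- def get_pairings(a, b):
--     if len(b) == 0:
--         return [[]]
--     if isinstance(a, set):
--         a = list(a)
--     if isinstance(b, set):
--         b = list(b)
--     res = [[]]
--     for ai in reversed(a):
--         res = [p + [(ai, bi)] for p in res for bi in b]
--     return res
-- ===== Notes on version B (the rewrite author's own statement) =====
-- stated objective: simpler
-- what changed: Replaced the recursive build-up with an iterative accumulator: start from [[]] and extend every partial pairing with each b-element for each a-element taken in reverse, using one list comprehension instead of recursion plus nested append loops.
import Mathlib
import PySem

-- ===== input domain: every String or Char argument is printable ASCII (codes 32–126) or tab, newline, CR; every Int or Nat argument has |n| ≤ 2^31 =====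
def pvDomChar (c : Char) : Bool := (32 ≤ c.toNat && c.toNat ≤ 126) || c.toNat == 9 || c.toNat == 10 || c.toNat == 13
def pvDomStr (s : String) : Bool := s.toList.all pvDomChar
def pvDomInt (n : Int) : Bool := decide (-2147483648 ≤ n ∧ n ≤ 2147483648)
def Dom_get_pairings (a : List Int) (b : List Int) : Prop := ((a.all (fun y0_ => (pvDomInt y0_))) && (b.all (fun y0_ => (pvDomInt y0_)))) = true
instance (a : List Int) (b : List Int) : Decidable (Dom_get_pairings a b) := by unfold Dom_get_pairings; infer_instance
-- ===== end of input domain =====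

-- B replaces A's recursion by an iterative accumulator over reversed a (objective: simpler).

-- ===== PORT A =====
-- literal port of A: recursion on a, nested loops appending (first_a, bi) pairings
def get_pairings (a : List Int) (b : List Int) : List (List (Int × Int)) :=
  if b.length = 0 then [[]]
  else
    match a with
    | [] => [[]]
    | first_a :: rest =>
      (get_pairings rest b).foldl
        (fun new_pairings successive_pairing =>
          b.foldl
            (fun np bi => np ++ [successive_pairing ++ [(first_a, bi)]])
            new_pairings)
        []

-- ===== PORT B =====
-- literal port of B: res = [[]]; for ai in reversed(a): res = [p + [(ai,bi)] for p in res for bi in b]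
def get_pairings_alt (a : List Int) (b : List Int) : List (List (Int × Int)) :=
  if b.length = 0 then [[]]
  else
    a.reverse.foldl
      (fun res ai => res.flatMap (fun p => b.map (fun bi => p ++ [(ai, bi)])))
      [[]]

-- ===== PRECONDITION & SPEC =====
def Spec_get_pairings (a : List Int) (b : List Int) (out : List (List (Int × Int))) : Prop := out = get_pairings_alt a b
instance (a : List Int) (b : List Int) (out : List (List (Int × Int))) : Decidable (Spec_get_pairings a b out) := by unfold Spec_get_pairings; infer_instance

-- ===== CLAIM (what is proved, stated in full; the proofs are below) =====
def Claim_equal_get_pairings : Prop := ∀ (a : List Int) (b : List Int), Dom_get_pairings a b → Spec_get_pairings a b (get_pairings a b)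

-- ===== LEMMAS AND PROOFS =====

theorem foldl_app_inner (b : List Int) (g : Int → List (Int × Int)) :
    ∀ (acc : List (List (Int × Int))),
      b.foldl (fun np bi => np ++ [g bi]) acc = acc ++ b.map g := by
  induction b with
  | nil => simp
  | cons x xs ih => intro acc; simp [List.foldl, ih]

theorem foldl_app_outer (b : List Int) (g : List (Int × Int) → Int → List (Int × Int)) :
    ∀ (l acc : List (List (Int × Int))),
      l.foldl (fun np sp => b.foldl (fun np2 bi => np2 ++ [g sp bi]) np) acc
        = acc ++ l.flatMap (fun sp => b.map (g sp)) := by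
  intro l
  induction l with
  | nil => simp
  | cons x xs ih =>
    intro acc
    rw [List.foldl, foldl_app_inner, ih]
    simp [List.flatMap]

theorem get_pairings_foldr (a b : List Int) (hb : b.length ≠ 0) :
    get_pairings a b
      = a.foldr (fun ai res => res.flatMap (fun p => b.map (fun bi => p ++ [(ai, bi)]))) [[]] := by
  induction a with
  | nil => simp [get_pairings, hb]
  | cons x xs ih =>
    rw [get_pairings]
    simp only [hb, List.foldr]
    rw [foldl_app_outer b (fun sp bi => sp ++ [(x, bi)]), ih]
    simp

theorem get_pairings_spec' (a b : List Int) : get_pairings a b = get_pairings_alt a b := by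
  by_cases hb : b.length = 0
  · cases a <;> simp [get_pairings, get_pairings_alt, hb]
  · rw [get_pairings_alt, if_neg hb, List.foldl_reverse, get_pairings_foldr a b hb]

-- ===== VERDICT (by name: the statement is the Claim_ definition above) =====
theorem get_pairings_spec : Claim_equal_get_pairings := by
  intro a b _
  exact get_pairings_spec' a b
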